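-- pv_equiv track=rewrite | github.com/JoseManuelMS97/SistemasGestionEmpresarial | Python/Examenes/Circuito.py | generar_circuito
-- ===== SOURCE A (Python) =====
-- def generar_circuito(nombres, longitud):
--     matriz = ""
--
--     for filas in range(len(nombres)):
--
--         for columnas in range(longitud):
--
--             if columnas == 0:
--                 matriz += f"\t{nombres[filas]}\t"
--
--             else:
--                 matriz += "\t----\t"
--
--         matriz += "\n"
--
--     return matriz
-- ===== SOURCE B (Python) =====
-- def generar_circuito(nombres, longitud):
--     if longitud <= 0:
--         return "\n" * len(nombres)
--     return "".join("\t" + n + "\t" + "\t----\t" * (longitud - 1) + "\n" for n in nombres)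
-- ===== Notes on version B (the rewrite author's own statement) =====
-- stated objective: simpler
-- what changed: B replaces A's nested per-cell loop with its columnas==0 branch by a closed-form row built once per name via string repetition ('\t----\t' * (longitud-1)) and joined, with the longitud<=0 case reduced to '\n' * len(nombres).
import Mathlib
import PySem

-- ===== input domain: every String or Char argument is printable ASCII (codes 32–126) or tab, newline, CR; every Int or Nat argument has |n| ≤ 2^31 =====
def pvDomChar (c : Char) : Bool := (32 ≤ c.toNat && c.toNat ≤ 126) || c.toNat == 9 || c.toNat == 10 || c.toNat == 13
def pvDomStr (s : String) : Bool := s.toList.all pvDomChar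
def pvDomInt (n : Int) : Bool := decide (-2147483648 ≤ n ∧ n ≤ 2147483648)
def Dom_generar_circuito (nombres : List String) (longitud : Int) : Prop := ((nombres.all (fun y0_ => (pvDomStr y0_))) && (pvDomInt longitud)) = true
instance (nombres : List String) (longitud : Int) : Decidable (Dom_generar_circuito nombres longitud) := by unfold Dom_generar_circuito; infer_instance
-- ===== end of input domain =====

-- B builds each row in closed form (name cell + repeated "----" cells) and joins rows,
-- replacing A's nested per-cell loop and its columnas==0 branch: simpler decomposition, same output.


-- ===== PORT A =====
-- literal port: outer loop over range(len(nombres)), inner loop over range(longitud),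
-- with the columnas == 0 branch emitting the name cell.
def generar_circuito (nombres : List String) (longitud : Int) : String :=
  (PySem.List.pyRange 0 (nombres.length : Int) 1).foldl
    (fun matriz filas =>
      ((PySem.List.pyRange 0 longitud 1).foldl
        (fun m columnas =>
          if columnas == 0 then
            m ++ ("\t" ++ PySem.List.pyGetD nombres filas "" ++ "\t")
          else
            m ++ "\t----\t") matriz) ++ "\n")
    ""

-- ===== PORT B =====
-- '"\t----\t" * k' (Python string repetition)
def pvStrRepeat (s : String) (k : Nat) : String := String.join (List.replicate k s)

def generar_circuito_alt (nombres : List String) (longitud : Int) : String :=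
  if longitud ≤ 0 then
    String.join (List.replicate nombres.length "\n")
  else
    String.join (nombres.map (fun n =>
      "\t" ++ n ++ "\t" ++ pvStrRepeat "\t----\t" (longitud - 1).toNat ++ "\n"))

-- ===== PRECONDITION & SPEC =====
def Spec_generar_circuito (nombres : List String) (longitud : Int) (out : String) : Prop := out = generar_circuito_alt nombres longitud
instance (nombres : List String) (longitud : Int) (out : String) : Decidable (Spec_generar_circuito nombres longitud out) := by unfold Spec_generar_circuito; infer_instance

-- ===== CLAIM (what is proved, stated in full; the proofs are below) =====
def Claim_equal_generar_circuito : Prop := ∀ (nombres : List String) (longitud : Int), Dom_generar_circuito nombres longitud → Spec_generar_circuito nombres longitud (generar_circuito nombres longitud)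

-- ===== LEMMAS AND PROOFS =====

-- foldl of ++ from an arbitrary seed splits off the seed
theorem pv_foldl_append_seed (l : List String) (a : String) :
    List.foldl (fun r s => r ++ s) a l = a ++ List.foldl (fun r s => r ++ s) "" l := by
  induction l generalizing a with
  | nil => simp
  | cons x xs ih =>
      simp only [List.foldl_cons, String.empty_append]
      rw [ih (a ++ x), ih x, String.append_assoc]

-- the tail of A's inner loop (indices ≥ 1) appends one "\t----\t" per index
theorem pv_inner_tail (g : String → Int → String)
    (hg : ∀ m c, 1 ≤ c → g m c = m ++ "\t----\t") :
    ∀ (k : Nat) (a : Int) (m : String), 1 ≤ a →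
      (PySem.List.pyRange a (a + (k : Int)) 1).foldl g m
        = m ++ pvStrRepeat "\t----\t" k := by
  intro k
  induction k with
  | zero =>
      intro a m _
      simp [PySem.List.pyRange, pvStrRepeat, String.join]
  | succ n ih =>
      intro a m ha
      rw [PySem.List.pyRange_one_cons (by omega)]
      simp only [List.foldl_cons]
      rw [hg m a ha]
      have harg : a + ((n : Int) + 1) = (a + 1) + (n : Int) := by ring
      push_cast
      rw [harg, ih (a + 1) _ (by omega)]
      simp only [pvStrRepeat, List.replicate_succ, String.join, List.foldl_cons,
        String.empty_append, String.append_assoc]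
      rw [pv_foldl_append_seed (List.replicate n "\t----\t") "\t----\t"]

-- A's inner loop builds B's closed-form row (minus the trailing newline) onto the accumulator
theorem pv_inner (longitud : Int) (name m : String) (h : ¬ longitud ≤ 0) :
    (PySem.List.pyRange 0 longitud 1).foldl
      (fun m columnas =>
        if columnas == 0 then m ++ ("\t" ++ name ++ "\t") else m ++ "\t----\t") m
      = m ++ ("\t" ++ name ++ "\t" ++ pvStrRepeat "\t----\t" (longitud - 1).toNat) := by
  rw [PySem.List.pyRange_one_cons (by omega)]
  simp only [List.foldl_cons]
  have h1 : longitud = (0 : Int) + 1 + ((longitud - 1).toNat : Int) := by omega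
  rw [show ((if (0 : Int) == 0 then m ++ ("\t" ++ name ++ "\t") else m ++ "\t----\t"))
        = m ++ ("\t" ++ name ++ "\t") from rfl]
  rw [h1, pv_inner_tail _ (fun m c hc => by
        have : ¬ (c == 0) = true := by simp; omega
        simp [this]) _ _ _ (by omega)]
  simp [String.append_assoc]

-- A's outer loop over indices 0..len-1 equals the join of the per-name rows
theorem pv_outer (row : String → String) :
    ∀ (nombres : List String) (acc : String),
      (PySem.List.pyRange 0 (nombres.length : Int) 1).foldl
        (fun m i => m ++ row (PySem.List.pyGetD nombres i "")) acc
        = acc ++ String.join (nombres.map row) := by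
  intro nombres
  induction nombres using List.reverseRecOn with
  | nil => intro acc; simp [PySem.List.pyRange, String.join]
  | append_singleton xs y ih =>
      intro acc
      have hlen : ((xs ++ [y]).length : Int) = (xs.length : Int) + 1 := by simp
      rw [hlen, PySem.List.pyRange_one_succ_right (by positivity), List.foldl_append]
      rw [PySem.List.foldl_congr_mem _ _
            (fun m i => m ++ row (PySem.List.pyGetD xs i "")) acc
            (fun m x hx => by
              rcases PySem.List.mem_pyRange_one.mp hx with ⟨hx0, hx1⟩
              have hx' : x = ((x.toNat : Nat) : Int) := by omega
              rw [hx']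
              simp only [PySem.List.pyGetD_natCast]
              have hlt : x.toNat < xs.length := by omega
              rw [List.getD_eq_getElem?_getD, List.getD_eq_getElem?_getD,
                  List.getElem?_append_left hlt])]
      rw [ih acc]
      simp only [List.foldl_cons, List.foldl_nil]
      rw [show PySem.List.pyGetD (xs ++ [y]) (xs.length : Int) "" = y from by
            rw [PySem.List.pyGetD_natCast]
            simp]
      simp [String.join, String.append_assoc]

-- ===== VERDICT (by name: the statement is the Claim_ definition above) =====
theorem generar_circuito_spec : Claim_equal_generar_circuito := by
  intro nombres longitud _
  unfold Spec_generar_circuito generar_circuito generar_circuito_alt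
  by_cases h : longitud ≤ 0
  · have hempty : PySem.List.pyRange 0 longitud 1 = [] := by
      simp [PySem.List.pyRange]; omega
    simp only [hempty, List.foldl_nil, if_pos h]
    rw [pv_outer (fun _ => "\n") nombres ""]
    simp [List.map_const']
  · simp only [if_neg h]
    have h2 := (pv_outer
      (fun n => "\t" ++ n ++ "\t" ++ pvStrRepeat "\t----\t" (longitud - 1).toNat ++ "\n")
      nombres "").trans String.empty_append
    rw [← h2]
    apply PySem.List.foldl_congr_mem
    intro acc x _
    rw [pv_inner longitud _ acc h]
    simp [String.append_assoc]
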